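-- pv_equiv track=rewrite | github.com/Print-TesteServer/CashTrack-Controle-Financeiro | backend/app/services/nl_query.py | _match_category
-- ===== SOURCE A (Python) =====
-- from typing import Any, Dict, List, Optional, Tuple
--
-- def _match_category(hint: Optional[str], names: List[str]) -> Optional[str]:
--     if not hint or not names:
--         return None
--     h = hint.strip().casefold()
--     for n in names:
--         if n.casefold() == h:
--             return n
--     for n in names:
--         if h in n.casefold() or n.casefold() in h:
--             return n
--     return None
-- ===== SOURCE B (Python) =====
-- from typing import List, Optional
--
-- def _match_category(hint: Optional[str], names: List[str]) -> Optional[str]: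
--     if not hint or not names:
--         return None
--     h = hint.strip().casefold()
--     best = None  # (name, is_exact)
--     for n in reversed(names):
--         nf = n.casefold()
--         if nf == h:
--             best = (n, True)
--         elif (h in nf or nf in h) and not (best is not None and best[1]):
--             best = (n, False)
--     return best[0] if best is not None else None
-- ===== Notes on version B (the rewrite author's own statement) =====
-- stated objective: alternative
-- what changed: Replaces A's two staged left-to-right scans (exact pass, then substring pass) by a single right-to-left fold over a tiered accumulator (name, is_exact) with no early return: an exact match always overwrites, a substring match overwrites only a non-exact state, so the leftmost exact match (else leftmost substring match) survives.
import Mathlib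
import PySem

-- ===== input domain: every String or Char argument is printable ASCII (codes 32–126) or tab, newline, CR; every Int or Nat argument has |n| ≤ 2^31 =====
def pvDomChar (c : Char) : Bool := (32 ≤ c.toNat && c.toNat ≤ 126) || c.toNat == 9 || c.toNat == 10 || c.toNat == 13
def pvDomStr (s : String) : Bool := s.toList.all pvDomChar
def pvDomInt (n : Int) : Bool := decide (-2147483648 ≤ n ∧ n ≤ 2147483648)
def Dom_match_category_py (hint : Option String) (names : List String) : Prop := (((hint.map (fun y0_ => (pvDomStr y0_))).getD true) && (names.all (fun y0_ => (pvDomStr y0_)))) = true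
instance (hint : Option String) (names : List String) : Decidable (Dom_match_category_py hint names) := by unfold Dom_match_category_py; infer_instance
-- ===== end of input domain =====

-- B replaces A's two staged scans by one right-to-left fold over a tiered accumulator (alternative decomposition, same cost).
-- str.casefold() is ported as PySem.Chars.lower: exact on the ASCII domain (Dom), where casefold = lower.

-- ===== PORT A =====
-- first loop of A: first name whose casefold equals h
def pvMatchExact (h : List Char) : List String → Option String
  | [] => none
  | n :: t => if PySem.Chars.lower n.toList = h then some n else pvMatchExact h t

-- second loop of A: first name with a substring relation to h (either direction)
def pvMatchSub (h : List Char) : List String → Option String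
  | [] => none
  | n :: t =>
      if PySem.Chars.isIn h (PySem.Chars.lower n.toList) || PySem.Chars.isIn (PySem.Chars.lower n.toList) h
      then some n else pvMatchSub h t

def match_category_py (hint : Option String) (names : List String) : Option String :=
  match hint with
  | none => none
  | some s =>
      if s.toList = [] ∨ names = [] then none
      else
        let h := PySem.Chars.lower (PySem.Chars.strip s.toList)
        match pvMatchExact h names with
        | some n => some n
        | none => pvMatchSub h names

-- ===== PORT B =====
-- body of B's reversed loop: exact match always overwrites; substring match only a non-exact state
def pvStepB (h : List Char) (best : Option (String × Bool)) (n : String) : Option (String × Bool) :=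
  let nf := PySem.Chars.lower n.toList
  if nf = h then some (n, true)
  else if (PySem.Chars.isIn h nf || PySem.Chars.isIn nf h)
          && !(match best with | some (_, ex) => ex | none => false) then some (n, false)
  else best

def match_category_py_alt (hint : Option String) (names : List String) : Option String :=
  match hint with
  | none => none
  | some s =>
      if s.toList = [] ∨ names = [] then none
      else
        let h := PySem.Chars.lower (PySem.Chars.strip s.toList)
        (names.reverse.foldl (pvStepB h) none).map Prod.fst

-- ===== PRECONDITION & SPEC =====
def Spec_match_category_py (hint : Option String) (names : List String) (out : Option String) : Prop := out = match_category_py_alt hint names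
instance (hint : Option String) (names : List String) (out : Option String) : Decidable (Spec_match_category_py hint names out) := by unfold Spec_match_category_py; infer_instance

-- ===== CLAIM (what is proved, stated in full; the proofs are below) =====
def Claim_equal_match_category_py : Prop := ∀ (hint : Option String) (names : List String), Dom_match_category_py hint names → Spec_match_category_py hint names (match_category_py hint names)

-- ===== LEMMAS AND PROOFS =====

/-- B's right-to-left fold ends in the leftmost exact match tagged `true`,
    else the leftmost substring match tagged `false`, else `none`. -/
theorem pvFoldB_eq (h : List Char) (names : List String) :
    names.reverse.foldl (pvStepB h) none =
      match pvMatchExact h names with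
      | some n => some (n, true)
      | none =>
        match pvMatchSub h names with
        | some n => some (n, false)
        | none => none := by
  rw [List.foldl_reverse]
  induction names with
  | nil => simp [pvMatchExact, pvMatchSub]
  | cons n t ih =>
      rw [List.foldr_cons, ih]
      by_cases he : PySem.Chars.lower n.toList = h
      · simp [pvMatchExact, pvStepB, he]
      · cases hx : pvMatchExact h t with
        | some m => simp [pvMatchExact, pvStepB, he, hx]
        | none =>
            by_cases hc : PySem.Chars.isIn h (PySem.Chars.lower n.toList) || PySem.Chars.isIn (PySem.Chars.lower n.toList) h
            · cases hs : pvMatchSub h t <;>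
                simp [pvMatchExact, pvMatchSub, pvStepB, he, hx, hc]
            · cases hs : pvMatchSub h t <;>
                simp [pvMatchExact, pvMatchSub, pvStepB, he, hx, hc, hs]

-- ===== VERDICT (by name: the statement is the Claim_ definition above) =====
theorem match_category_py_spec : Claim_equal_match_category_py := by
  intro hint names _
  unfold Spec_match_category_py match_category_py match_category_py_alt
  cases hint with
  | none => rfl
  | some s =>
      dsimp only
      split_ifs with hguard
      · rfl
      · rw [pvFoldB_eq]
        cases pvMatchExact (PySem.Chars.lower (PySem.Chars.strip s.toList)) names with
        | some n => rfl
        | none => cases pvMatchSub (PySem.Chars.lower (PySem.Chars.strip s.toList)) names <;> rfl
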